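-- pv_equiv track=rewrite | github.com/HenrySpeaker/Car-Listing-Tracker | cardata/aggregate_data.py | get_first_model
-- ===== SOURCE A (Python) =====
-- def get_first_model(model_str):
--     start = 0
--
--     while start < len(model_str) and model_str[start] in '"[]':
--         start += 1
--
--     end = start
--
--     while end < len(model_str) and model_str[end] not in '"[]':
--         end += 1
--
--     return model_str[start:end]
-- ===== SOURCE B (Python) =====
-- import re
--
-- def get_first_model(model_str):
--     m = re.search(r'[^"\[\]]+', model_str)
--     return m.group() if m else ""
-- ===== Notes on version B (the rewrite author's own statement) =====
-- stated objective: idiomatic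
-- what changed: Replaces the two manual index-scanning while loops with a single regex search for the first maximal run of non-delimiter characters.
import Mathlib
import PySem

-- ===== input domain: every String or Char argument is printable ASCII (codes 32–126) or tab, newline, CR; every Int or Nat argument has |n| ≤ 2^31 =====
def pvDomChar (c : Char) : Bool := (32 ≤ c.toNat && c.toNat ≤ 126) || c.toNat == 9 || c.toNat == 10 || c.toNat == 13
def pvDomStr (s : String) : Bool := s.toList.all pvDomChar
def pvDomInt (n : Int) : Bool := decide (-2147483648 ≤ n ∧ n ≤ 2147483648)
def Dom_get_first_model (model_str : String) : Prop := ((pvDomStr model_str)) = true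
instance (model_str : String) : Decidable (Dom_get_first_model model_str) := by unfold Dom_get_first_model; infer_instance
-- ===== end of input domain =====

-- B replaces A's two manual index-scanning while loops with a single regex search
-- for the first maximal run of non-delimiter characters (objective: idiomatic).

-- ===== PORT A =====
-- membership test c in '"[]'
def pvDelim (c : Char) : Bool := c = '"' || c = '[' || c = ']'

-- first while loop: advance start while it points at a delimiter
def pvAStart (cs : List Char) (start : Nat) : Nat :=
  if h : start < cs.length then
    if pvDelim cs[start] then pvAStart cs (start + 1) else start
  else start
termination_by cs.length - start

-- second while loop: advance end while it points at a non-delimiter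
def pvAEnd (cs : List Char) (e : Nat) : Nat :=
  if h : e < cs.length then
    if !pvDelim cs[e] then pvAEnd cs (e + 1) else e
  else e
termination_by cs.length - e

def get_first_model (model_str : String) : String :=
  String.ofList (PySem.List.slice model_str.toList
    (some ((pvAStart model_str.toList 0 : Nat) : Int))
    (some ((pvAEnd model_str.toList (pvAStart model_str.toList 0) : Nat) : Int)))

-- ===== PORT B =====
-- re.search(r'[^"\[\]]+', s): the first maximal run of non-delimiter characters
-- starts after the leading run of delimiters and extends while chars are
-- non-delimiters; no match (all delimiters / empty) yields "".
def get_first_model_alt (model_str : String) : String :=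
  String.ofList ((model_str.toList.dropWhile pvDelim).takeWhile (fun c => !pvDelim c))

-- ===== PRECONDITION & SPEC =====
def Spec_get_first_model (model_str : String) (out : String) : Prop := out = get_first_model_alt model_str
instance (model_str : String) (out : String) : Decidable (Spec_get_first_model model_str out) := by unfold Spec_get_first_model; infer_instance

-- ===== CLAIM (what is proved, stated in full; the proofs are below) =====
def Claim_equal_get_first_model : Prop := ∀ (model_str : String), Dom_get_first_model model_str → Spec_get_first_model model_str (get_first_model model_str)

-- ===== LEMMAS AND PROOFS =====

theorem pvAStart_drop (cs : List Char) (i : Nat) :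
    cs.drop (pvAStart cs i) = (cs.drop i).dropWhile pvDelim := by
  fun_induction pvAStart cs i with
  | case1 i h hd ih =>
    rw [ih, List.drop_eq_getElem_cons h, List.dropWhile_cons_of_pos hd]
  | case2 i h hd =>
    rw [List.drop_eq_getElem_cons h, List.dropWhile_cons_of_neg (by simpa using hd),
      ← List.drop_eq_getElem_cons h]
  | case3 i h =>
    rw [List.drop_eq_nil_of_le (by omega), List.dropWhile_nil]

theorem pvAEnd_le (cs : List Char) (e : Nat) : e ≤ pvAEnd cs e := by
  fun_induction pvAEnd cs e with
  | case1 e h hd ih => omega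
  | case2 e h hd => omega
  | case3 e h => omega

theorem pvAEnd_take (cs : List Char) (e : Nat) :
    (cs.drop e).take (pvAEnd cs e - e) = (cs.drop e).takeWhile (fun c => !pvDelim c) := by
  fun_induction pvAEnd cs e with
  | case1 e h hd ih =>
    have hle := pvAEnd_le cs (e + 1)
    rw [List.drop_eq_getElem_cons h, List.takeWhile_cons_of_pos (by simpa using hd)]
    have heq : pvAEnd cs (e + 1) - e = (pvAEnd cs (e + 1) - (e + 1)) + 1 := by omega
    rw [heq, List.take_succ_cons, ih]
  | case2 e h hd =>
    rw [List.drop_eq_getElem_cons h, List.takeWhile_cons_of_neg (by simpa using hd)]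
    simp
  | case3 e h =>
    rw [List.drop_eq_nil_of_le (by omega)]
    simp

-- ===== VERDICT (by name: the statement is the Claim_ definition above) =====
theorem get_first_model_spec : Claim_equal_get_first_model := by
  intro s _
  unfold Spec_get_first_model get_first_model get_first_model_alt
  rw [PySem.List.slice_natCast]
  rw [pvAEnd_take, pvAStart_drop]
  simp
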